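-- pv_equiv track=rewrite | github.com/AliEmreKeskin/boolean-satisfiability | task3/n-queens-smt2-generator.py | at_most_one_queen_on_every_diagonal
-- ===== SOURCE A (Python) =====
-- def at_most_one_queen_on_every_diagonal(the_n):
--     string = ""
--     for i in range(1, the_n):
--         for i_prime in range(i + 1, the_n + 1):  # guaranties i<i_prime
--             for j in range(1, the_n + 1):
--                 for j_prime in range(1, the_n + 1):
--                     if (i + j == i_prime + j_prime) or (i - j == i_prime - j_prime):
--                         string += "(or (not (p {i_} {j_})) (not (p {i_prime_} {j_prime_})))\n".format(
--                             i_=i, j_=j, i_prime_=i_prime, j_prime_=j_prime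
--                         )
--     return string
-- ===== SOURCE B (Python) =====
-- def at_most_one_queen_on_every_diagonal(the_n):
--     parts = []
--     for i in range(1, the_n):
--         for i_prime in range(i + 1, the_n + 1):
--             d = i_prime - i
--             for j in range(1, the_n + 1):
--                 if j - d >= 1:
--                     parts.append(
--                         "(or (not (p {0} {1})) (not (p {2} {3})))\n".format(i, j, i_prime, j - d)
--                     )
--                 if j + d <= the_n:
--                     parts.append(
--                         "(or (not (p {0} {1})) (not (p {2} {3})))\n".format(i, j, i_prime, j + d)
--                     )
--     return "".join(parts)
-- ===== Notes on version B (the rewrite author's own statement) =====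
-- stated objective: faster
-- what changed: B drops A's innermost scan over all candidate columns j' and instead computes the only two diagonal matches j-(i'-i) and j+(i'-i) directly, collecting the lines in a list joined once instead of repeated string concatenation (O(n^3) vs O(n^4)).
import Mathlib
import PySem

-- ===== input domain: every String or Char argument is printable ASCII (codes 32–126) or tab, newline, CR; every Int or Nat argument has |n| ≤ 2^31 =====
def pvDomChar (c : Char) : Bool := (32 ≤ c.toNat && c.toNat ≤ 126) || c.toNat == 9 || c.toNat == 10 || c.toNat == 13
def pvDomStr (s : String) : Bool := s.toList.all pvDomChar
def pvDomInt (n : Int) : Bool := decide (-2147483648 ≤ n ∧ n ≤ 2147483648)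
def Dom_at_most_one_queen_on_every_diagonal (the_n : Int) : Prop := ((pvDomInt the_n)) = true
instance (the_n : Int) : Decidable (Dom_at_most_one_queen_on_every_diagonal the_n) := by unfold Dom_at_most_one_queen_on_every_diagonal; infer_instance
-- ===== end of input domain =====

-- B replaces A's innermost scan over all j' by computing the only two matching
-- columns j±(i'-i) directly and joining the collected lines: one loop fewer, measurably faster.

-- ===== PORT A =====
-- shared formatting helper: the literal "(or (not (p {i} {j})) (not (p {i'} {j'})))\n"
def pvLine (i j i_prime j_prime : Int) : String :=
  "(or (not (p " ++ PySem.Int.toStr i ++ " " ++ PySem.Int.toStr j ++ ")) (not (p "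
    ++ PySem.Int.toStr i_prime ++ " " ++ PySem.Int.toStr j_prime ++ ")))\n"

def at_most_one_queen_on_every_diagonal (the_n : Int) : String :=
  (PySem.List.pyRange 1 the_n 1).foldl (fun string i =>
    (PySem.List.pyRange (i + 1) (the_n + 1) 1).foldl (fun string i_prime =>
      (PySem.List.pyRange 1 (the_n + 1) 1).foldl (fun string j =>
        (PySem.List.pyRange 1 (the_n + 1) 1).foldl (fun string j_prime =>
          if i + j = i_prime + j_prime ∨ i - j = i_prime - j_prime then
            string ++ pvLine i j i_prime j_prime
          else string) string) string) string) ""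

-- ===== PORT B =====
def at_most_one_queen_on_every_diagonal_alt (the_n : Int) : String :=
  PySem.Str.join "" ((PySem.List.pyRange 1 the_n 1).flatMap (fun i =>
    (PySem.List.pyRange (i + 1) (the_n + 1) 1).flatMap (fun i_prime =>
      let d := i_prime - i
      (PySem.List.pyRange 1 (the_n + 1) 1).flatMap (fun j =>
        (if 1 ≤ j - d then [pvLine i j i_prime (j - d)] else []) ++
        (if j + d ≤ the_n then [pvLine i j i_prime (j + d)] else [])))))

-- ===== PRECONDITION & SPEC =====
def Spec_at_most_one_queen_on_every_diagonal (the_n : Int) (out : String) : Prop := out = at_most_one_queen_on_every_diagonal_alt the_n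
instance (the_n : Int) (out : String) : Decidable (Spec_at_most_one_queen_on_every_diagonal the_n out) := by unfold Spec_at_most_one_queen_on_every_diagonal; infer_instance

-- ===== CLAIM (what is proved, stated in full; the proofs are below) =====
def Claim_equal_at_most_one_queen_on_every_diagonal : Prop := ∀ (the_n : Int), Dom_at_most_one_queen_on_every_diagonal the_n → Spec_at_most_one_queen_on_every_diagonal the_n (at_most_one_queen_on_every_diagonal the_n)

-- ===== LEMMAS AND PROOFS =====

lemma pvJoin_cons (a : String) (l : List String) :
    PySem.Str.join "" (a :: l) = a ++ PySem.Str.join "" l := by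
  simp only [PySem.Str.join, String.toList_empty, List.map_cons]
  rw [show ∀ (x : List Char) ll, PySem.Chars.join [] (x :: ll) = x ++ PySem.Chars.join [] ll from ?_]
  · rw [← String.toList_inj]; simp
  · intro x ll
    simp only [PySem.Chars.join]
    simp [List.intercalate]
    cases ll <;> simp

lemma pvJoin_nil : PySem.Str.join "" [] = "" := by decide

lemma pvJoin_append (l1 l2 : List String) :
    PySem.Str.join "" (l1 ++ l2) = PySem.Str.join "" l1 ++ PySem.Str.join "" l2 := by
  induction l1 with
  | nil => simp [pvJoin_nil, String.empty_append]
  | cons a t ih => simp [pvJoin_cons, ih, String.append_assoc]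

lemma pvJoin_flatMap (g : Int → List String) (l : List Int) :
    PySem.Str.join "" (l.flatMap g) = PySem.Str.join "" (l.map (fun x => PySem.Str.join "" (g x))) := by
  induction l with
  | nil => rfl
  | cons a t ih => simp [pvJoin_cons, pvJoin_append, ih]

lemma pvFoldl_cat (f : String → Int → String) (g : Int → String)
    (hf : ∀ s x, f s x = s ++ g x) :
    ∀ (l : List Int) (s0 : String), l.foldl f s0 = s0 ++ PySem.Str.join "" (l.map g) := by
  intro l
  induction l with
  | nil => intro s0; simp [pvJoin_nil]
  | cons a t ih =>
      intro s0
      simp only [List.foldl_cons, List.map_cons, pvJoin_cons, hf, ih, String.append_assoc]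

lemma pvJoin_map_ite (p : Int → Prop) [DecidablePred p] (g : Int → String) (l : List Int) :
    PySem.Str.join "" (l.map (fun x => if p x then g x else ""))
      = PySem.Str.join "" ((l.filter (fun x => decide (p x))).map g) := by
  induction l with
  | nil => rfl
  | cons a t ih =>
      by_cases h : p a
      · simp [pvJoin_cons, h, ih]
      · simp [pvJoin_cons, h, ih, String.empty_append]

lemma pvFilter_two (a b : Int) (hab : a < b) :
    ∀ (l : List Int), l.Pairwise (· < ·) →
      l.filter (fun x => decide (x = a ∨ x = b))
        = (if a ∈ l then [a] else []) ++ (if b ∈ l then [b] else []) := by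
  intro l
  induction l with
  | nil => simp
  | cons x t ih =>
      intro hp
      have hlt : ∀ y ∈ t, x < y := fun y hy => (List.pairwise_cons.mp hp).1 y hy
      have ht := ih (List.pairwise_cons.mp hp).2
      simp only [Bool.decide_or] at ht
      have hne : ¬ a = b := by omega
      have hne' : ¬ b = a := by omega
      by_cases hxa : x = a
      · have hna : a ∉ t := fun hm => absurd (hlt a hm) (by omega)
        have hba : ¬ b = x := by omega
        simp [hxa, hna, hne', ht]
      · by_cases hxb : x = b
        · have hnb : b ∉ t := fun hm => absurd (hlt b hm) (by omega)
          have hna : a ∉ t := fun hm => absurd (hlt a hm) (by omega)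
          have hax : ¬ a = x := by omega
          simp [hxb, hna, hnb, hne, ht]
        · have hax : ¬ a = x := fun h => hxa h.symm
          have hbx : ¬ b = x := fun h => hxb h.symm
          simp [hxa, hxb, hax, hbx, ht]

-- the innermost loop of A equals B's two direct candidates, for admissible i, i', j
lemma pvCore (the_n i i_prime j : Int) (hi : 1 ≤ i) (hii : i < i_prime)
    (hin : i_prime ≤ the_n) (hj1 : 1 ≤ j) (hjn : j ≤ the_n) :
    PySem.Str.join "" ((PySem.List.pyRange 1 (the_n + 1) 1).map
        (fun j_prime => if i + j = i_prime + j_prime ∨ i - j = i_prime - j_prime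
          then pvLine i j i_prime j_prime else ""))
      = PySem.Str.join ""
          ((if 1 ≤ j - (i_prime - i) then [pvLine i j i_prime (j - (i_prime - i))] else []) ++
           (if j + (i_prime - i) ≤ the_n then [pvLine i j i_prime (j + (i_prime - i))] else [])) := by
  set d := i_prime - i with hd
  have hd1 : 1 ≤ d := by omega
  rw [pvJoin_map_ite]
  have hcong : (PySem.List.pyRange 1 (the_n + 1) 1).filter
      (fun x => decide (i + j = i_prime + x ∨ i - j = i_prime - x))
      = (PySem.List.pyRange 1 (the_n + 1) 1).filter (fun x => decide (x = j - d ∨ x = j + d)) := by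
    apply List.filter_congr
    intro x _
    simp only [decide_eq_decide]
    omega
  rw [hcong, pvFilter_two (j - d) (j + d) (by omega) _ (PySem.List.pairwise_lt_pyRange_one 1 (the_n + 1))]
  have hm1 : (j - d ∈ PySem.List.pyRange 1 (the_n + 1) 1) ↔ 1 ≤ j - d := by
    rw [PySem.List.mem_pyRange_one]; omega
  have hm2 : (j + d ∈ PySem.List.pyRange 1 (the_n + 1) 1) ↔ j + d ≤ the_n := by
    rw [PySem.List.mem_pyRange_one]; omega
  by_cases h1 : 1 ≤ j - d <;> by_cases h2 : j + d ≤ the_n <;>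
    simp [hm1, hm2, h1, h2]

theorem pvMain (the_n : Int) :
    at_most_one_queen_on_every_diagonal the_n = at_most_one_queen_on_every_diagonal_alt the_n := by
  unfold at_most_one_queen_on_every_diagonal at_most_one_queen_on_every_diagonal_alt
  rw [pvFoldl_cat _ (fun i => PySem.Str.join "" ((PySem.List.pyRange (i + 1) (the_n + 1) 1).map
        (fun i_prime => PySem.Str.join "" ((PySem.List.pyRange 1 (the_n + 1) 1).map
          (fun j => PySem.Str.join "" ((PySem.List.pyRange 1 (the_n + 1) 1).map
            (fun j_prime => if i + j = i_prime + j_prime ∨ i - j = i_prime - j_prime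
              then pvLine i j i_prime j_prime else "")))))))]
  · rw [pvJoin_flatMap]
    show "" ++ _ = _
    rw [String.empty_append]
    congr 1
    apply List.map_congr_left
    intro i him
    rw [pvJoin_flatMap]
    congr 1
    apply List.map_congr_left
    intro i_prime hip
    rw [pvJoin_flatMap]
    congr 1
    apply List.map_congr_left
    intro j hjm
    rw [PySem.List.mem_pyRange_one] at him hip hjm
    exact pvCore the_n i i_prime j (by omega) (by omega) (by omega) (by omega) (by omega)
  · intro s i
    rw [pvFoldl_cat _ (fun i_prime => PySem.Str.join "" ((PySem.List.pyRange 1 (the_n + 1) 1).map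
          (fun j => PySem.Str.join "" ((PySem.List.pyRange 1 (the_n + 1) 1).map
            (fun j_prime => if i + j = i_prime + j_prime ∨ i - j = i_prime - j_prime
              then pvLine i j i_prime j_prime else "")))))]
    intro s i_prime
    rw [pvFoldl_cat _ (fun j => PySem.Str.join "" ((PySem.List.pyRange 1 (the_n + 1) 1).map
            (fun j_prime => if i + j = i_prime + j_prime ∨ i - j = i_prime - j_prime
              then pvLine i j i_prime j_prime else "")))]
    intro s j
    rw [pvFoldl_cat _ (fun j_prime => if i + j = i_prime + j_prime ∨ i - j = i_prime - j_prime
              then pvLine i j i_prime j_prime else "")]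
    intro s j_prime
    split <;> simp

-- ===== VERDICT (by name: the statement is the Claim_ definition above) =====
theorem at_most_one_queen_on_every_diagonal_spec : Claim_equal_at_most_one_queen_on_every_diagonal := by
  intro the_n _
  unfold Spec_at_most_one_queen_on_every_diagonal
  exact pvMain the_n
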